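-- pv_equiv track=rewrite | github.com/lzxz1234/Utilities | Utilities/t.py | short_int
-- ===== SOURCE A (Python) =====
-- def short_int(num):
--     result = []
--     symbol = [chr(x) for x in range(ord('a'), ord('z') + 1)]
--     symbol.extend([chr(x) for x in range(ord('A'), ord('Z') + 1)])
--     symbol.extend([str(x) for x in range(10)])
--     while True:
--         if num == 0: break
--         num, rem = divmod(num, len(symbol))
--         result.append(symbol[rem])
--     return ''.join([str(x) for x in result[::-1]])
-- ===== SOURCE B (Python) =====
-- SYMBOL = "abcdefghijklmnopqrstuvwxyzABCDEFGHIJKLMNOPQRSTUVWXYZ0123456789"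
--
-- def short_int(num):
--     if num == 0:
--         return ""
--     q, r = divmod(num, 62)
--     return short_int(q) + SYMBOL[r]
-- ===== Notes on version B (the rewrite author's own statement) =====
-- stated objective: simpler
-- what changed: Replaced the list-accumulating while loop with its [::-1] reversal and join by a direct recursion that emits digits most-significant-first onto a constant symbol string.
import Mathlib
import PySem

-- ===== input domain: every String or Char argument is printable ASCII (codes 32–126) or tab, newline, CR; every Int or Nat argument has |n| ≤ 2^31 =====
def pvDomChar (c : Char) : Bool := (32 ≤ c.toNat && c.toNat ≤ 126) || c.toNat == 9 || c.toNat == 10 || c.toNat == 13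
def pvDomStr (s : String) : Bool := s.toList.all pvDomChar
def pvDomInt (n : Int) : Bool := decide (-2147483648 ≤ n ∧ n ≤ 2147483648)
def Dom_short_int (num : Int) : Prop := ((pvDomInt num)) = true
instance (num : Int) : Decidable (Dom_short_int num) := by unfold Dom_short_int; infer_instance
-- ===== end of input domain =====

-- B replaces A's digit-list accumulation and reversal by a direct most-significant-first recursion (objective: simpler).

-- ===== PORT A =====
-- symbol = [chr(a..z)] + [chr(A..Z)] + [str(0..9)]  (a list of one-character strings)
def symbolA : List String :=
  ((PySem.List.pyRange 97 123 1).map (fun x => String.ofList [Char.ofNat x.toNat]))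
  ++ ((PySem.List.pyRange 65 91 1).map (fun x => String.ofList [Char.ofNat x.toNat]))
  ++ ((PySem.List.pyRange 0 10 1).map (fun x => PySem.Int.toStr x))

-- the while loop; the 'num ≤ 0' test is a totality guard only: Pre_ restricts to 0 ≤ num,
-- on which it coincides with Python's 'if num == 0: break'
def loopA (num : Int) (result : List String) : List String :=
  if num ≤ 0 then result
  else loopA (PySem.Int.floordiv num 62) (result ++ [symbolA.getD (PySem.Int.mod num 62).toNat ""])
termination_by num.toNat
decreasing_by
  have : PySem.Int.floordiv num 62 < num := by
    rw [PySem.Int.floordiv_eq_ediv_of_pos (by omega)]; omega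
  have : 0 ≤ PySem.Int.floordiv num 62 := by
    rw [PySem.Int.floordiv_eq_ediv_of_pos (by omega)]; omega
  omega

def short_int (num : Int) : String :=
  String.join (loopA num []).reverse

-- ===== PORT B =====
def symbolB : List Char :=
  "abcdefghijklmnopqrstuvwxyzABCDEFGHIJKLMNOPQRSTUVWXYZ0123456789".toList

def short_int_alt (num : Int) : String :=
  if num ≤ 0 then ""   -- totality guard; Python base case is num == 0, Pre_ gives 0 ≤ num
  else short_int_alt (PySem.Int.floordiv num 62)
       ++ String.ofList [symbolB.getD (PySem.Int.mod num 62).toNat ' ']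
termination_by num.toNat
decreasing_by
  have : PySem.Int.floordiv num 62 < num := by
    rw [PySem.Int.floordiv_eq_ediv_of_pos (by omega)]; omega
  have : 0 ≤ PySem.Int.floordiv num 62 := by
    rw [PySem.Int.floordiv_eq_ediv_of_pos (by omega)]; omega
  omega

-- ===== PRECONDITION & SPEC =====
-- Pre_ excludes num < 0, on which the Python A never returns (divmod floors, num sticks at -1: infinite loop).
def Pre_short_int (num : Int) : Prop := 0 ≤ num
instance (num : Int) : Decidable (Pre_short_int num) := by unfold Pre_short_int; infer_instance
def pvWitness_short_int : Int := (12345)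

def Spec_short_int (num : Int) (out : String) : Prop := out = short_int_alt num
instance (num : Int) (out : String) : Decidable (Spec_short_int num out) := by unfold Spec_short_int; infer_instance

-- ===== CLAIM (what is proved, stated in full; the proofs are below) =====
def Claim_equal_short_int : Prop := ∀ (num : Int), Dom_short_int num → Pre_short_int num → Spec_short_int num (short_int num)

-- ===== LEMMAS AND PROOFS =====

-- the two symbol tables agree digit by digit
lemma symbol_agree (r : Nat) (hr : r < 62) :
    symbolA.getD r "" = String.ofList [symbolB.getD r ' '] := by
  interval_cases r <;> decide

lemma foldr_append_str (acc : List String) (s : String) :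
    List.foldr (fun x y => y ++ x) s acc = s ++ List.foldr (fun x y => y ++ x) "" acc := by
  induction acc with
  | nil => simp
  | cons a l ih => simp [ih, String.append_assoc]

lemma join_reverse_append (acc : List String) (s : String) :
    String.join (acc ++ [s]).reverse = s ++ String.join acc.reverse := by
  simp only [String.join, List.reverse_append, List.reverse_cons, List.reverse_nil,
    List.nil_append, List.singleton_append, List.foldl_cons, List.foldl_reverse]
  rw [foldr_append_str]
  simp

-- loop invariant: joining the reversed accumulated digits equals B's recursion plus the old suffix
lemma loopA_invariant (num : Int) (_hnn : 0 ≤ num) :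
    ∀ acc : List String,
      String.join (loopA num acc).reverse = short_int_alt num ++ String.join acc.reverse := by
  intro acc
  by_cases h0 : num ≤ 0
  · rw [loopA, short_int_alt]
    simp [h0]
  · have hpos : 0 < num := by omega
    have hq0 : 0 ≤ PySem.Int.floordiv num 62 := by
      rw [PySem.Int.floordiv_eq_ediv_of_pos (by omega)]; omega
    have hqlt : PySem.Int.floordiv num 62 < num := by
      rw [PySem.Int.floordiv_eq_ediv_of_pos (by omega)]; omega
    have hr : (PySem.Int.mod num 62).toNat < 62 := by
      rw [PySem.Int.mod_eq_emod_of_pos (by omega)]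
      omega
    rw [loopA, short_int_alt]
    simp only [h0, if_false]
    rw [loopA_invariant _ hq0 _]
    rw [join_reverse_append, symbol_agree _ hr]
    rw [← String.append_assoc]
termination_by num.toNat
decreasing_by
  omega

-- ===== VERDICT (by name: the statement is the Claim_ definition above) =====
theorem short_int_spec : Claim_equal_short_int := by
  intro num _ hpre
  unfold Spec_short_int short_int
  have := loopA_invariant num hpre []
  simpa [String.join] using this
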